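-- pv_equiv track=rewrite | github.com/GLEECBTC/komodo-docs-mdx | utils/py/generate_environment_postman.py | _filter_electrum_servers
-- ===== SOURCE A (Python) =====
-- from typing import Dict, List, Any, Optional
--
-- def _filter_electrum_servers(servers: List[Dict], environment: str) -> List[Dict]:
--     """Filter electrum servers based on environment protocol preferences."""
--     if environment == 'wasm':
--         # WASM only supports WSS
--         return [s for s in servers if s.get('protocol') == 'WSS']
--     elif environment == 'native':
--         # Native prefers TCP and SSL, but can use WSS
--         preferred_order = ['TCP', 'SSL', 'WSS']
--         sorted_servers = []
--         for protocol in preferred_order: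
--             sorted_servers.extend([s for s in servers if s.get('protocol') == protocol])
--         return sorted_servers[:3]  # Limit to 3 servers
--     else:
--         return servers
-- ===== SOURCE B (Python) =====
-- def _filter_electrum_servers(servers, environment):
--     """Filter electrum servers based on environment protocol preferences."""
--     if environment == 'wasm':
--         return [s for s in servers if s.get('protocol') == 'WSS']
--     if environment == 'native':
--         # single pass: partition into per-protocol buckets, then concatenate in preference order
--         buckets = {'TCP': [], 'SSL': [], 'WSS': []}
--         for s in servers:
--             p = s.get('protocol')
--             if p in buckets:
--                 buckets[p].append(s)
--         return (buckets['TCP'] + buckets['SSL'] + buckets['WSS'])[:3]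
--     return servers
-- ===== Notes on version B (the rewrite author's own statement) =====
-- stated objective: simpler
-- what changed: The 'native' branch's three sequential filter passes over the server list (one per preferred protocol) are replaced by a single pass that partitions servers into per-protocol buckets, concatenated in preference order and truncated to 3.
import Mathlib
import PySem

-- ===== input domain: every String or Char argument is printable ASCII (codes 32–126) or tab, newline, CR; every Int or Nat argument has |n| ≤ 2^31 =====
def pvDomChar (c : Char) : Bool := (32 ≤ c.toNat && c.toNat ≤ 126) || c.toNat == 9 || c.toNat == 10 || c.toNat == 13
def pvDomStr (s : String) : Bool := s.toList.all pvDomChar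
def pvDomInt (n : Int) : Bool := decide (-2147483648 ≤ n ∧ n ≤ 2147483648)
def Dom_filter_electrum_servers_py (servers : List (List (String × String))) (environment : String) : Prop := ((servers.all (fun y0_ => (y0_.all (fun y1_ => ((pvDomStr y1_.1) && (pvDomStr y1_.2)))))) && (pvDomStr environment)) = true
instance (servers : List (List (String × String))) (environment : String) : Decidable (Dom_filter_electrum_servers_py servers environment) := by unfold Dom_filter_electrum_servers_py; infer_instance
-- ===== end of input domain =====

-- B replaces the native branch's three per-protocol filter passes with one bucket-partition pass (simpler, one traversal).


-- s.get('protocol') on a Python dict, ported via the association-list Dict (first match)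
def pvProto (s : List (String × String)) : Option String := PySem.Dict.get? (PySem.Dict.mk s) "protocol"

-- ===== PORT A =====
def filter_electrum_servers_py (servers : List (List (String × String))) (environment : String) : List (List (String × String)) :=
  if environment == "wasm" then
    servers.filter (fun s => pvProto s == some "WSS")
  else if environment == "native" then
    let preferred_order := ["TCP", "SSL", "WSS"]
    let sorted_servers := preferred_order.foldl
      (fun acc protocol => acc ++ servers.filter (fun s => pvProto s == some protocol)) []
    PySem.List.slice sorted_servers none (some 3)
  else servers

-- ===== PORT B =====
-- the three buckets of B's dict, as a triple (TCP, SSL, WSS)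
def pvBucketStep (b : List (List (String × String)) × List (List (String × String)) × List (List (String × String)))
    (s : List (String × String)) :
    List (List (String × String)) × List (List (String × String)) × List (List (String × String)) :=
  let p := pvProto s
  if p == some "TCP" then (b.1 ++ [s], b.2.1, b.2.2)
  else if p == some "SSL" then (b.1, b.2.1 ++ [s], b.2.2)
  else if p == some "WSS" then (b.1, b.2.1, b.2.2 ++ [s])
  else b

def filter_electrum_servers_py_alt (servers : List (List (String × String))) (environment : String) : List (List (String × String)) :=
  if environment == "wasm" then
    servers.filter (fun s => pvProto s == some "WSS")
  else if environment == "native" then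
    let b := servers.foldl pvBucketStep ([], [], [])
    (b.1 ++ b.2.1 ++ b.2.2).take 3
  else servers

-- ===== PRECONDITION & SPEC =====
def Spec_filter_electrum_servers_py (servers : List (List (String × String))) (environment : String) (out : List (List (String × String))) : Prop := out = filter_electrum_servers_py_alt servers environment
instance (servers : List (List (String × String))) (environment : String) (out : List (List (String × String))) : Decidable (Spec_filter_electrum_servers_py servers environment out) := by unfold Spec_filter_electrum_servers_py; infer_instance

-- ===== CLAIM (what is proved, stated in full; the proofs are below) =====
def Claim_equal_filter_electrum_servers_py : Prop := ∀ (servers : List (List (String × String))) (environment : String), Dom_filter_electrum_servers_py servers environment → Spec_filter_electrum_servers_py servers environment (filter_electrum_servers_py servers environment)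

-- ===== LEMMAS AND PROOFS =====
-- bucket invariant: the single pass accumulates exactly the three filters
theorem pvBuckets_spec (servers : List (List (String × String)))
    (t s w : List (List (String × String))) :
    servers.foldl pvBucketStep (t, s, w) =
      (t ++ servers.filter (fun x => pvProto x == some "TCP"),
       s ++ servers.filter (fun x => pvProto x == some "SSL"),
       w ++ servers.filter (fun x => pvProto x == some "WSS")) := by
  induction servers generalizing t s w with
  | nil => simp
  | cons x xs ih =>
    simp only [List.foldl_cons, List.filter_cons, pvBucketStep]
    by_cases h1 : pvProto x == some "TCP"
    · have h1' : pvProto x = some "TCP" := by simpa using h1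
      simp [h1', ih]
    · by_cases h2 : pvProto x == some "SSL"
      · have h2' : pvProto x = some "SSL" := by simpa using h2
        simp [h2', ih]
      · by_cases h3 : pvProto x == some "WSS"
        · have h3' : pvProto x = some "WSS" := by simpa using h3
          simp [h3', ih]
        · simp [h1, h2, h3, ih]

-- ===== VERDICT (by name: the statement is the Claim_ definition above) =====
theorem filter_electrum_servers_py_spec : Claim_equal_filter_electrum_servers_py := by
  intro servers environment _
  unfold Spec_filter_electrum_servers_py filter_electrum_servers_py filter_electrum_servers_py_alt
  by_cases hw : environment == "wasm"
  · simp [hw]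
  · by_cases hn : environment == "native"
    · simp only [hw, hn, if_false, if_true, Bool.false_eq_true]
      rw [pvBuckets_spec]
      simp [PySem.List.slice_to, List.append_assoc]
    · simp [hw, hn]
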